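-- pv_equiv track=rewrite | github.com/Pepedrm/Practica1TDMD | ejercicio4.py | es_dcpo
-- ===== SOURCE A (Python) =====
-- def es_reflexiva(P, R):
--     """Verifica si la relación es reflexiva."""
--     for a in P:
--         if (a, a) not in R:
--             return False
--     return True
--
-- def es_antisimetrica(P, R):
--     """Verifica si la relación es antisimétrica."""
--     for a, b in R:
--         if a != b and (b, a) in R:
--             return False
--     return True
--
-- def es_transitiva(P, R):
--     """Verifica si la relación es transitiva."""
--     for a, b in R:
--         for c, d in R:
--             if b == c and (a, d) not in R:
--                 return False
--     return True
--
-- def es_orden_parcial(P, R):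
--     """Verifica si la relación es un orden parcial."""
--     return es_reflexiva(P, R) and es_antisimetrica(P, R) and es_transitiva(P, R)
--
-- def es_dirigido(P, R, A):
--     """Verifica si el subconjunto A es dirigido bajo la relación R."""
--     for i in range(len(A)):
--         for j in range(i + 1, len(A)):
--             a, b = A[i], A[j]
--             encontrado_mayor_comun_superior = False
--             for c in A:
--                 if (a, c) in R and (b, c) in R:
--                     encontrado_mayor_comun_superior = True
--                     break
--             if not encontrado_mayor_comun_superior:
--                 return False
--     return True
--
-- def encontrar_supremo(P, R, A):
--     """Encuentra el supremo de un subconjunto dirigido A bajo la relación R."""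
--     posibles_supremos = []
--     for c in P:
--         if all((a, c) in R for a in A):
--             posibles_supremos.append(c)
--
--     if not posibles_supremos:
--         return None
--
--     supremo = posibles_supremos[0]
--     for s in posibles_supremos:
--         if (s, supremo) in R and s != supremo:
--             supremo = s
--     return supremo
--
-- def es_dcpo(P, R):
--     """Verifica si P es un dcpo bajo la relación R."""
--     # Verificar si es un orden parcial
--     if not es_orden_parcial(P, R):
--         return False
--
--     # Verificar que cada subconjunto dirigido tiene un supremo
--     for tamano_subconjunto in range(2, len(P) + 1):
--         subconjuntos_dirigidos = []
--
--         # Generar todos los subconjuntos dirigidos de tamaño tamano_subconjunto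
--         for i in range(len(P)):
--             A = P[i:i+tamano_subconjunto]
--             if len(A) == tamano_subconjunto and es_dirigido(P, R, A):
--                 subconjuntos_dirigidos.append(A)
--
--         # Verificar que cada subconjunto dirigido tiene un supremo
--         for A in subconjuntos_dirigidos:
--             if encontrar_supremo(P, R, A) is None:
--                 return False
--
--     return True
-- ===== SOURCE B (Python) =====
-- def es_dcpo(P, R):
--     """Verifica si P es un dcpo bajo la relacion R.
--
--     Incremental re-implementation: R is indexed once into an upper-set dict
--     up[x] = {c : (x,c) in R}.  The partial-order axioms become dict lookups and
--     one subset test per edge.  For each window start i the contiguous windows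
--     P[i:j+1] are processed in a single left-to-right sweep that maintains
--     (a) U, the set of upper bounds in P of the whole window, shrunk by one set
--         intersection per step, and
--     (b) pending, the common-upper-bound sets of the value pairs of the window
--         that do not yet have a common upper bound inside the window,
--     so directedness and the existence of an upper bound are read off the state
--     instead of being recomputed from scratch for every window.
--     """
--     up = {}
--     for a, b in R:
--         up.setdefault(a, set()).add(b)
--
--     # reflexive
--     for a in P:
--         if a not in up.get(a, ()):
--             return False
--     # antisymmetric
--     for a, b in R:
--         if a != b and a in up.get(b, ()):
--             return False
--     # transitive: up[b] <= up[a] for every edge (a, b)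
--     for a, b in R:
--         if not up.get(b, set()) <= up.get(a, set()):
--             return False
--
--     Pset = set(P)
--     n = len(P)
--     for i in range(n):
--         U = up.get(P[i], set()) & Pset   # upper bounds in P of the current window
--         W = {P[i]}                       # values of the current window
--         pending = []                     # pairs (as common-upper-bound sets) still unmet
--         for j in range(i + 1, n):
--             v = P[j]
--             uv = up.get(v, set())
--             U = U & uv
--             W = W | {v}
--             pending = [m for m in pending if v not in m]
--             for w in W:
--                 m = up.get(w, set()) & uv
--                 if not (m & W):
--                     pending.append(m)
--             if not pending and not U:
--                 return False
--     return True
-- ===== Notes on version B (the rewrite author's own statement) =====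
-- stated objective: alternative
-- what changed: B indexes R once into an upper-set dict (dict lookups and a one-subset-test-per-edge transitivity check) and replaces A's per-window recomputation by one incremental left-to-right sweep per window start that maintains the window's upper-bound set by set intersection and its still-unmet value pairs in a pending list, so directedness and upper-bound existence are read off the carried state instead of rescanning every window.
import Mathlib
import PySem

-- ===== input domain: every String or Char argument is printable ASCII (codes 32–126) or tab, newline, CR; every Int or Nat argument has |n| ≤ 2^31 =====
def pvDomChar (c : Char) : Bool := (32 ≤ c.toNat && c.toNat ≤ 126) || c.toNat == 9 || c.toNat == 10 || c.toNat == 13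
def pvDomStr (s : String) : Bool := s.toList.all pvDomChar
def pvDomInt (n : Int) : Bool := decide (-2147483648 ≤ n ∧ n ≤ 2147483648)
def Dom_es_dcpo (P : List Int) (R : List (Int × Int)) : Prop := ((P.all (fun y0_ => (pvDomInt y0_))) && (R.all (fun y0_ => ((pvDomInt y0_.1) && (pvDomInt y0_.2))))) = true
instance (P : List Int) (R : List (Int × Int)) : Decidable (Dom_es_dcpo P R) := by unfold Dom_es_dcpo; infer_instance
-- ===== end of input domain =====

-- B indexes R once into an upper-set dict and replaces A's per-window recomputation by one
-- incremental sweep per window start (upper-bound set shrunk by intersection, unmet value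
-- pairs kept in a pending list): a genuinely different algorithm of similar measured cost.

-- ===== PORT A =====
-- loop bounds (range, slices) are nonnegative throughout, so Nat ranges / drop-take are exact
def es_reflexiva (P : List Int) (R : List (Int × Int)) : Bool :=
  P.all (fun a => decide ((a, a) ∈ R))

def es_antisimetrica (P : List Int) (R : List (Int × Int)) : Bool :=
  R.all (fun p => !(decide (p.1 ≠ p.2) && decide ((p.2, p.1) ∈ R)))

def es_transitiva (P : List Int) (R : List (Int × Int)) : Bool :=
  R.all (fun p => R.all (fun q => !(decide (p.2 = q.1) && !decide ((p.1, q.2) ∈ R))))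

def es_orden_parcial (P : List Int) (R : List (Int × Int)) : Bool :=
  es_reflexiva P R && es_antisimetrica P R && es_transitiva P R

def es_dirigido (P : List Int) (R : List (Int × Int)) (A : List Int) : Bool :=
  (List.range A.length).all fun i =>
    (List.range' (i + 1) (A.length - (i + 1))).all fun j =>
      -- 'encontrado_mayor_comun_superior' flag with break = List.any
      A.any fun c => decide ((A.getD i 0, c) ∈ R) && decide ((A.getD j 0, c) ∈ R)

def encontrar_supremo (P : List Int) (R : List (Int × Int)) (A : List Int) : Option Int :=
  let posibles := P.filter fun c => A.all fun a => decide ((a, c) ∈ R)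
  match posibles with
  | [] => none
  | s0 :: rest =>
      some ((s0 :: rest).foldl
        (fun supremo s => if decide ((s, supremo) ∈ R) && decide (s ≠ supremo) then s else supremo) s0)

def es_dcpo (P : List Int) (R : List (Int × Int)) : Bool :=
  if !es_orden_parcial P R then false
  else
    -- range(2, len(P)+1)
    (List.range' 2 (P.length - 1)).all fun size =>
      let dirigidos := (List.range P.length).foldl
        (fun acc i =>
          let A := (P.drop i).take size   -- P[i:i+size]
          if A.length == size && es_dirigido P R A then acc ++ [A] else acc) []
      dirigidos.all fun A => (encontrar_supremo P R A).isSome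

-- ===== PORT B =====
-- up = {}; for a, b in R: up.setdefault(a, set()).add(b)
def buildUp (R : List (Int × Int)) : PySem.Dict Int (PySem.Set Int) :=
  R.foldl (fun d p => d.modify p.1 PySem.Set.empty (fun s => PySem.Set.add s p.2)) PySem.Dict.empty

-- the inner 'for j in range(i+1, n)' sweep: state (U, W, pending) over the remaining values v = P[j]
def bSweep (upd : PySem.Dict Int (PySem.Set Int)) (U W : PySem.Set Int)
    (pending : List (PySem.Set Int)) : List Int → Bool
  | [] => true
  | v :: rest =>
      let uv := upd.getD v PySem.Set.empty
      let U' := PySem.Set.inter U uv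
      let W' := PySem.Set.union W [v]
      let pend1 := pending.filter (fun m => !(PySem.Set.contains m v))
      let pend2 := W'.foldl (fun acc w =>
          let m := PySem.Set.inter (upd.getD w PySem.Set.empty) uv
          if (PySem.Set.inter m W').isEmpty then acc ++ [m] else acc) pend1
      if pend2.isEmpty && U'.isEmpty then false
      else bSweep upd U' W' pend2 rest

def es_dcpo_alt (P : List Int) (R : List (Int × Int)) : Bool :=
  let upd := buildUp R
  -- reflexive: a in up.get(a, ())
  if !(P.all fun a => PySem.Set.contains (upd.getD a PySem.Set.empty) a) then false
  -- antisymmetric: not (a != b and a in up.get(b, ()))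
  else if !(R.all fun p => !(decide (p.1 ≠ p.2) && PySem.Set.contains (upd.getD p.2 PySem.Set.empty) p.1)) then false
  -- transitive: up.get(b, set()) <= up.get(a, set())
  else if !(R.all fun p => PySem.Set.issubset (upd.getD p.2 PySem.Set.empty) (upd.getD p.1 PySem.Set.empty)) then false
  else
    let Pset := PySem.Set.ofList P
    (List.range P.length).all fun i =>
      bSweep upd (PySem.Set.inter (upd.getD (P.getD i 0) PySem.Set.empty) Pset)
        [P.getD i 0] [] (P.drop (i + 1))

-- ===== PRECONDITION & SPEC =====
def Spec_es_dcpo (P : List Int) (R : List (Int × Int)) (out : Bool) : Prop := out = es_dcpo_alt P R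
instance (P : List Int) (R : List (Int × Int)) (out : Bool) : Decidable (Spec_es_dcpo P R out) := by unfold Spec_es_dcpo; infer_instance

-- ===== CLAIM (what is proved, stated in full; the proofs are below) =====
def Claim_equal_es_dcpo : Prop := ∀ (P : List Int) (R : List (Int × Int)), Dom_es_dcpo P R → Spec_es_dcpo P R (es_dcpo P R)

-- ===== LEMMAS AND PROOFS =====

-- proof-only closed forms for a window A
def dirB (R : List (Int × Int)) (A : List Int) : Bool :=
  A.all fun x => A.all fun y => A.any fun c => decide ((x, c) ∈ R) && decide ((y, c) ∈ R)

def ubB (P : List Int) (R : List (Int × Int)) (A : List Int) : Bool :=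
  P.any fun c => A.all fun x => decide ((x, c) ∈ R)

def winOK (P : List Int) (R : List (Int × Int)) (A : List Int) : Bool :=
  !(dirB R A && !ubB P R A)

def sweepSpec (P : List Int) (R : List (Int × Int)) : List Int → List Int → Bool
  | _, [] => true
  | A, v :: rest => winOK P R (A ++ [v]) && sweepSpec P R (A ++ [v]) rest

-- invariant carried by bSweep's state for the already-consumed window A
def SweepInv (P : List Int) (R : List (Int × Int)) (A : List Int)
    (U W : List Int) (pending : List (List Int)) : Prop :=
  (∀ c, c ∈ U ↔ c ∈ P ∧ ∀ x ∈ A, (x, c) ∈ R) ∧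
  (∀ x, x ∈ W ↔ x ∈ A) ∧
  (∀ m ∈ pending, (∃ x ∈ A, ∃ y ∈ A, ∀ c, c ∈ m ↔ ((x, c) ∈ R ∧ (y, c) ∈ R)) ∧ ∀ c ∈ A, c ∉ m) ∧
  (∀ x ∈ A, ∀ y ∈ A, (∀ c ∈ A, ¬((x, c) ∈ R ∧ (y, c) ∈ R)) →
      ∃ m ∈ pending, ∀ c, c ∈ m ↔ ((x, c) ∈ R ∧ (y, c) ∈ R))

lemma mem_buildUp_gen (l : List (Int × Int)) (a b : Int) :
    ∀ d : PySem.Dict Int (PySem.Set Int),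
      b ∈ (l.foldl (fun d p => d.modify p.1 PySem.Set.empty (fun s => PySem.Set.add s p.2)) d).getD a PySem.Set.empty ↔
        b ∈ d.getD a PySem.Set.empty ∨ (a, b) ∈ l := by
  induction l with
  | nil => simp
  | cons p rest ih =>
      intro d
      obtain ⟨p1, p2⟩ := p
      rw [List.foldl_cons, ih]
      by_cases h : a = p1
      · subst h
        rw [PySem.Dict.getD_modify_self, PySem.Set.mem_add]
        simp [Prod.ext_iff]
        tauto
      · rw [PySem.Dict.getD_modify_of_ne _ _ _ h]
        simp [Prod.ext_iff]
        tauto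

lemma mem_buildUp (R : List (Int × Int)) (a b : Int) :
    b ∈ (buildUp R).getD a ([] : PySem.Set Int) ↔ (a, b) ∈ R := by
  have := mem_buildUp_gen R a b PySem.Dict.empty
  simpa [buildUp, PySem.Set.empty] using this

lemma mem_buildUpE (R : List (Int × Int)) (a b : Int) :
    b ∈ (buildUp R).getD a PySem.Set.empty ↔ (a, b) ∈ R := mem_buildUp R a b

-- A-side characterisations
lemma refl_iff (P : List Int) (R : List (Int × Int)) :
    es_reflexiva P R = true ↔ ∀ a ∈ P, (a, a) ∈ R := by
  simp [es_reflexiva]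

lemma anti_iff (P : List Int) (R : List (Int × Int)) :
    es_antisimetrica P R = true ↔ ∀ p ∈ R, p.1 = p.2 ∨ (p.2, p.1) ∉ R := by
  simp [es_antisimetrica]

lemma trans_iff (P : List Int) (R : List (Int × Int)) :
    es_transitiva P R = true ↔ ∀ p ∈ R, ∀ q ∈ R, p.2 = q.1 → (p.1, q.2) ∈ R := by
  simp [es_transitiva]
  constructor
  · intro h a b hab c d hcd heq
    rcases h a b hab c d hcd with h' | h'
    · exact absurd heq h'
    · exact h'
  · intro h a b hab c d hcd
    by_cases heq : b = c
    · exact Or.inr (h a b hab c d hcd heq)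
    · exact Or.inl heq

-- B-side characterisations of the three order checks
lemma altRefl_iff (P : List Int) (R : List (Int × Int)) :
    (P.all fun a => PySem.Set.contains ((buildUp R).getD a PySem.Set.empty) a) = true ↔
      ∀ a ∈ P, (a, a) ∈ R := by
  simp [PySem.Set.contains_iff, mem_buildUp]

lemma altAnti_iff (P : List Int) (R : List (Int × Int)) :
    (R.all fun p => !(decide (p.1 ≠ p.2) && PySem.Set.contains ((buildUp R).getD p.2 PySem.Set.empty) p.1)) = true ↔
      ∀ p ∈ R, p.1 = p.2 ∨ (p.2, p.1) ∉ R := by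
  simp [PySem.Set.contains_iff, mem_buildUp]

lemma altTrans_iff (P : List Int) (R : List (Int × Int)) :
    (R.all fun p => PySem.Set.issubset ((buildUp R).getD p.2 PySem.Set.empty) ((buildUp R).getD p.1 PySem.Set.empty)) = true ↔
      ∀ p ∈ R, ∀ q ∈ R, p.2 = q.1 → (p.1, q.2) ∈ R := by
  simp only [List.all_eq_true]
  constructor
  · intro h p hp q hq heq
    have := (PySem.Set.issubset_iff _ _).mp (h p hp)
    have hd : q.2 ∈ (buildUp R).getD p.2 PySem.Set.empty := by
      rw [mem_buildUpE, heq]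
      exact (by simpa using hq : (q.1, q.2) ∈ R)
    have := this q.2 hd
    rwa [mem_buildUpE] at this
  · intro h p hp
    rw [PySem.Set.issubset_iff]
    intro x hx
    rw [mem_buildUpE] at hx ⊢
    exact h p hp (p.2, x) hx rfl

-- collecting foldl: the dirigidos list, tested with .all
lemma foldl_collect_all {α β : Type} (g : α → β) (q : α → Bool) (c : β → Bool)
    (l : List α) (init : List β) :
    ((l.foldl (fun acc i => if q i then acc ++ [g i] else acc) init).all c) =
      (init.all c && l.all fun i => !q i || c (g i)) := by
  induction l generalizing init with
  | nil => simp
  | cons x xs ih =>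
      by_cases hq : q x = true <;> simp [hq, ih, Bool.and_assoc]

-- supremum exists iff an upper bound exists
lemma sup_iff (P : List Int) (R : List (Int × Int)) (A : List Int) :
    (encontrar_supremo P R A).isSome = ubB P R A := by
  unfold encontrar_supremo ubB
  rcases h : P.filter (fun c => A.all fun a => decide ((a, c) ∈ R)) with _ | ⟨s0, rest⟩
  · simp only [Option.isSome_none]
    rw [eq_comm, Bool.eq_false_iff]
    intro hany
    rw [List.any_eq_true] at hany
    obtain ⟨c, hc, hall⟩ := hany
    have hmem : c ∈ P.filter (fun c => A.all fun a => decide ((a, c) ∈ R)) :=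
      List.mem_filter.mpr ⟨hc, hall⟩
    rw [h] at hmem; simp at hmem
  · simp only [Option.isSome_some]
    rw [eq_comm, List.any_eq_true]
    have hmem : s0 ∈ P.filter (fun c => A.all fun a => decide ((a, c) ∈ R)) := by rw [h]; simp
    rw [List.mem_filter] at hmem
    exact ⟨s0, hmem.1, hmem.2⟩

-- directedness: A's index pairs ↔ the value-pair closed form, given reflexivity on A's members
lemma dir_iff (P : List Int) (R : List (Int × Int)) (A : List Int)
    (hr : ∀ x ∈ A, (x, x) ∈ R) :
    es_dirigido P R A = dirB R A := by
  rw [Bool.eq_iff_iff]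
  simp only [es_dirigido, dirB, List.all_eq_true, List.any_eq_true, List.mem_range,
    List.mem_range'_1, Bool.and_eq_true, decide_eq_true_eq]
  constructor
  · intro h x hx y hy
    obtain ⟨p, hp, hpx⟩ := List.mem_iff_getElem.mp hx
    obtain ⟨q, hq, hqy⟩ := List.mem_iff_getElem.mp hy
    rcases lt_trichotomy p q with hpq | hpq | hpq
    · obtain ⟨c, hc, h1, h2⟩ := h p hp q ⟨by omega, by omega⟩
      refine ⟨c, hc, ?_, ?_⟩
      · rwa [List.getD_eq_getElem _ _ hp, hpx] at h1
      · rwa [List.getD_eq_getElem _ _ hq, hqy] at h2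
    · subst hpq; rw [hpx] at hqy; subst hqy
      exact ⟨x, hx, hr x hx, hr x hx⟩
    · obtain ⟨c, hc, h1, h2⟩ := h q hq p ⟨by omega, by omega⟩
      refine ⟨c, hc, ?_, ?_⟩
      · rwa [List.getD_eq_getElem _ _ hp, hpx] at h2
      · rwa [List.getD_eq_getElem _ _ hq, hqy] at h1
  · intro h i hi j hj
    obtain ⟨c, hc, h1, h2⟩ := h (A[i]) (List.getElem_mem hi) (A[j]) (List.getElem_mem (by omega))
    refine ⟨c, hc, ?_, ?_⟩
    · rwa [List.getD_eq_getElem _ _ hi]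
    · rwa [List.getD_eq_getElem _ _ (by omega)]

lemma inter_isEmpty_iff (m W' : List Int) :
    (PySem.Set.inter m W').isEmpty = true ↔ ∀ c ∈ m, c ∉ W' := by
  rw [List.isEmpty_iff, List.eq_nil_iff_forall_not_mem]
  constructor
  · intro h c hc hcW
    exact h c ((PySem.Set.mem_inter m W' c).mpr ⟨hc, hcW⟩)
  · intro h c hc
    obtain ⟨h1, h2⟩ := (PySem.Set.mem_inter m W' c).mp hc
    exact h c h1 h2

-- one bSweep step preserves the invariant
lemma sweepStep (P : List Int) (R : List (Int × Int)) (A : List Int)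
    (U W : List Int) (pending : List (List Int)) (v : Int)
    (hInv : SweepInv P R A U W pending) :
    SweepInv P R (A ++ [v])
      (PySem.Set.inter U ((buildUp R).getD v PySem.Set.empty))
      (PySem.Set.union W [v])
      (pending.filter (fun m => !(PySem.Set.contains m v)) ++
        ((PySem.Set.union W [v]).filter (fun w =>
            (PySem.Set.inter (PySem.Set.inter ((buildUp R).getD w PySem.Set.empty) ((buildUp R).getD v PySem.Set.empty)) (PySem.Set.union W [v])).isEmpty)).map
          (fun w => PySem.Set.inter ((buildUp R).getD w PySem.Set.empty) ((buildUp R).getD v PySem.Set.empty))) := by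
  obtain ⟨hU, hW, hSnd, hCmp⟩ := hInv
  have hMf : ∀ w c : Int,
      c ∈ PySem.Set.inter ((buildUp R).getD w PySem.Set.empty) ((buildUp R).getD v PySem.Set.empty) ↔
        ((w, c) ∈ R ∧ (v, c) ∈ R) := by
    intro w c
    rw [PySem.Set.mem_inter, mem_buildUpE, mem_buildUpE]
  have hW' : ∀ x : Int, x ∈ PySem.Set.union W [v] ↔ x ∈ A ++ [v] := by
    intro x
    rw [PySem.Set.mem_union, hW]
    simp
  refine ⟨?_, hW', ?_, ?_⟩
  · intro c
    rw [PySem.Set.mem_inter, hU, mem_buildUpE]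
    constructor
    · rintro ⟨⟨hcP, hall⟩, hv⟩
      refine ⟨hcP, fun x hx => ?_⟩
      rcases List.mem_append.mp hx with h | h
      · exact hall x h
      · simp at h; subst h; exact hv
    · rintro ⟨hcP, hall⟩
      exact ⟨⟨hcP, fun x hx => hall x (by simp [hx])⟩, hall v (by simp)⟩
  · -- soundness of the new pending list
    intro m hm
    rcases List.mem_append.mp hm with hm | hm
    · rw [List.mem_filter] at hm
      obtain ⟨hmp, hv⟩ := hm
      have hvm : v ∉ m := by simpa [PySem.Set.contains_iff] using hv
      obtain ⟨⟨x, hx, y, hy, hMm⟩, hdis⟩ := hSnd m hmp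
      refine ⟨⟨x, by simp [hx], y, by simp [hy], hMm⟩, ?_⟩
      intro c hc
      rcases List.mem_append.mp hc with h | h
      · exact hdis c h
      · simp at h; subst h; exact hvm
    · rw [List.mem_map] at hm
      obtain ⟨w, hwmem, rfl⟩ := hm
      rw [List.mem_filter] at hwmem
      obtain ⟨hwW', hwe⟩ := hwmem
      refine ⟨⟨w, (hW' w).mp hwW', v, by simp, fun c => hMf w c⟩, ?_⟩
      intro c hc hcm
      exact (inter_isEmpty_iff _ _).mp hwe c hcm ((hW' c).mpr hc)
  · -- completeness of the new pending list
    intro x hx y hy hbad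
    rcases List.mem_append.mp hy with hyA | hyv
    · rcases List.mem_append.mp hx with hxA | hxv
      · -- both old: the stored pair survives the filter
        have hbadA : ∀ c ∈ A, ¬((x, c) ∈ R ∧ (y, c) ∈ R) :=
          fun c hc => hbad c (by simp [hc])
        obtain ⟨m, hmp, hMm⟩ := hCmp x hxA y hyA hbadA
        have hvm : v ∉ m := by
          intro hv
          exact hbad v (by simp) ((hMm v).mp hv)
        refine ⟨m, List.mem_append.mpr (Or.inl ?_), hMm⟩
        rw [List.mem_filter]
        exact ⟨hmp, by simp [PySem.Set.contains_iff, hvm]⟩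
      · -- x = v, y old: the pair (y, v) was just examined
        simp at hxv; subst hxv
        have hcond : ∀ c ∈ PySem.Set.inter ((buildUp R).getD y PySem.Set.empty) ((buildUp R).getD x PySem.Set.empty),
            c ∉ PySem.Set.union W [x] := by
          intro c hc hcW
          obtain ⟨h1, h2⟩ := (hMf y c).mp hc
          exact hbad c ((hW' c).mp hcW) ⟨h2, h1⟩
        refine ⟨_, List.mem_append.mpr (Or.inr (List.mem_map.mpr
          ⟨y, List.mem_filter.mpr ⟨(hW' y).mpr hy, (inter_isEmpty_iff _ _).mpr hcond⟩, rfl⟩)), ?_⟩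
        intro c
        rw [hMf]
        exact and_comm
    · -- y = v: the pair (x, v) was just examined
      simp at hyv; subst hyv
      have hcond : ∀ c ∈ PySem.Set.inter ((buildUp R).getD x PySem.Set.empty) ((buildUp R).getD y PySem.Set.empty),
          c ∉ PySem.Set.union W [y] := by
        intro c hc hcW
        exact hbad c ((hW' c).mp hcW) ((hMf x c).mp hc)
      exact ⟨_, List.mem_append.mpr (Or.inr (List.mem_map.mpr
        ⟨x, List.mem_filter.mpr ⟨(hW' x).mpr hx, (inter_isEmpty_iff _ _).mpr hcond⟩, rfl⟩)),
        fun c => hMf x c⟩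

-- the carried state reads off directedness and upper-bound existence of the window
lemma pending_nil_iff (P : List Int) (R : List (Int × Int)) (A : List Int)
    (U W : List Int) (pending : List (List Int)) (hInv : SweepInv P R A U W pending) :
    pending = [] ↔ dirB R A = true := by
  obtain ⟨-, -, hSnd, hCmp⟩ := hInv
  constructor
  · intro hnil
    simp only [dirB, List.all_eq_true, List.any_eq_true, Bool.and_eq_true, decide_eq_true_eq]
    intro x hx y hy
    by_contra hno
    push_neg at hno
    obtain ⟨m, hm, -⟩ := hCmp x hx y hy (fun c hc hcc => hno c hc hcc.1 hcc.2)
    rw [hnil] at hm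
    exact List.not_mem_nil hm
  · intro hdir
    rcases hp : pending with _ | ⟨m, ms⟩
    · rfl
    · exfalso
      obtain ⟨⟨x, hx, y, hy, hMm⟩, hdis⟩ := hSnd m (by rw [hp]; exact List.mem_cons_self ..)
      simp only [dirB, List.all_eq_true, List.any_eq_true, Bool.and_eq_true, decide_eq_true_eq] at hdir
      obtain ⟨c, hc, h1, h2⟩ := hdir x hx y hy
      exact hdis c hc ((hMm c).mpr ⟨h1, h2⟩)

lemma U_nil_iff (P : List Int) (R : List (Int × Int)) (A : List Int)
    (U W : List Int) (pending : List (List Int)) (hInv : SweepInv P R A U W pending) :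
    U = [] ↔ ubB P R A = false := by
  obtain ⟨hU, -, -, -⟩ := hInv
  rw [List.eq_nil_iff_forall_not_mem]
  simp only [ubB, Bool.eq_false_iff, ne_eq, List.any_eq_true, List.all_eq_true,
    decide_eq_true_eq, not_exists, not_and]
  constructor
  · intro h c hc hall
    exact h c ((hU c).mpr ⟨hc, hall⟩)
  · intro h c hc
    obtain ⟨hcP, hall⟩ := (hU c).mp hc
    exact h c hcP hall

lemma bSweep_eq (P : List Int) (R : List (Int × Int)) :
    ∀ (rest A : List Int) (U W : List Int) (pending : List (List Int)),
      SweepInv P R A U W pending →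
      bSweep (buildUp R) U W pending rest = sweepSpec P R A rest := by
  intro rest
  induction rest with
  | nil => intro A U W pending _; rfl
  | cons v rest ih =>
      intro A U W pending hInv
      simp only [bSweep, sweepSpec]
      rw [PySem.List.foldl_append_if]
      set U2 := PySem.Set.inter U ((buildUp R).getD v PySem.Set.empty) with hU2
      set pend2 := pending.filter (fun m => !(PySem.Set.contains m v)) ++
        ((PySem.Set.union W [v]).filter (fun w =>
            (PySem.Set.inter (PySem.Set.inter ((buildUp R).getD w PySem.Set.empty) ((buildUp R).getD v PySem.Set.empty)) (PySem.Set.union W [v])).isEmpty)).map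
          (fun w => PySem.Set.inter ((buildUp R).getD w PySem.Set.empty) ((buildUp R).getD v PySem.Set.empty)) with hp2
      have hInv' : SweepInv P R (A ++ [v]) U2 (PySem.Set.union W [v]) pend2 := by
        rw [hU2, hp2]
        exact sweepStep P R A U W pending v hInv
      have hdir := pending_nil_iff P R (A ++ [v]) _ _ _ hInv'
      have hub := U_nil_iff P R (A ++ [v]) _ _ _ hInv'
      have hkey : (pend2.isEmpty && U2.isEmpty) = true ↔ winOK P R (A ++ [v]) = false := by
        rw [Bool.and_eq_true, List.isEmpty_iff, List.isEmpty_iff, hdir, hub]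
        cases hd : dirB R (A ++ [v]) <;> cases hu2 : ubB P R (A ++ [v]) <;>
          simp [winOK, hd, hu2]
      by_cases hw : winOK P R (A ++ [v]) = true
      · have hcf : (pend2.isEmpty && U2.isEmpty) = false := by
          rw [Bool.eq_false_iff]
          intro hct
          rw [hkey.mp hct] at hw
          exact absurd hw (by simp)
        rw [if_neg (by rw [hcf]; simp), ih (A ++ [v]) _ _ _ hInv', hw, Bool.true_and]
      · have hwf : winOK P R (A ++ [v]) = false := Bool.eq_false_iff.mpr hw
        rw [if_pos (hkey.mpr hwf), hwf, Bool.false_and]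

lemma sweepInit (P : List Int) (R : List (Int × Int)) (h1 : ∀ a ∈ P, (a, a) ∈ R)
    (x0 : Int) (hx0 : x0 ∈ P) :
    SweepInv P R [x0]
      (PySem.Set.inter ((buildUp R).getD x0 PySem.Set.empty) (PySem.Set.ofList P)) [x0] [] := by
  refine ⟨?_, fun x => Iff.rfl, by simp, ?_⟩
  · intro c
    rw [PySem.Set.mem_inter, mem_buildUpE, PySem.Set.mem_ofList]
    simp
    tauto
  · intro x hx y hy hbad
    simp at hx hy
    subst hx; subst hy
    exact absurd ⟨h1 _ hx0, h1 _ hx0⟩ (hbad _ (by simp))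

lemma sweepSpec_iff (P : List Int) (R : List (Int × Int)) :
    ∀ (rest A : List Int),
      sweepSpec P R A rest = true ↔
        ∀ t : Nat, 1 ≤ t → t ≤ rest.length → winOK P R (A ++ rest.take t) = true := by
  intro rest
  induction rest with
  | nil =>
      intro A
      simp [sweepSpec]
      intro t ht1 ht2
      omega
  | cons v rest ih =>
      intro A
      simp only [sweepSpec, Bool.and_eq_true, ih (A ++ [v])]
      constructor
      · rintro ⟨hw, hrest⟩ t ht1 ht2
        obtain ⟨t', rfl⟩ : ∃ t', t = t' + 1 := ⟨t - 1, by omega⟩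
        rw [List.take_succ_cons, List.append_cons]
        rcases Nat.eq_zero_or_pos t' with h0 | hpos
        · subst h0; simpa using hw
        · exact hrest t' hpos (by simpa using ht2)
      · intro h
        refine ⟨?_, ?_⟩
        · have := h 1 (by omega) (by simp)
          simpa using this
        · intro t ht1 ht2
          have := h (t + 1) (by omega) (by simp; omega)
          rw [List.take_succ_cons, List.append_cons] at this
          exact this

lemma window_iff (P : List Int) (R : List (Int × Int)) (h1 : ∀ a ∈ P, (a, a) ∈ R)
    (i s : Nat) (hle : i + s ≤ P.length) :
    ((!((List.take s (List.drop i P)).length == s && es_dirigido P R (List.take s (List.drop i P))) ||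
        (encontrar_supremo P R (List.take s (List.drop i P))).isSome) = true) ↔
      winOK P R (List.take s (List.drop i P)) = true := by
  have hd := dir_iff P R (List.take s (List.drop i P))
    (fun x hx => h1 x (List.mem_of_mem_drop (List.mem_of_mem_take hx)))
  have hs := sup_iff P R (List.take s (List.drop i P))
  have hlen : (List.take s (List.drop i P)).length = s := by simp; omega
  rw [winOK, ← hd, ← hs, hlen]
  cases es_dirigido P R (List.take s (List.drop i P)) <;>
    cases (encontrar_supremo P R (List.take s (List.drop i P))).isSome <;> simp

lemma window_shift (P : List Int) (i : Nat) (hi : i < P.length) (t : Nat) :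
    [P.getD i 0] ++ (P.drop (i + 1)).take t = (P.drop i).take (t + 1) := by
  rw [List.getD_eq_getElem _ _ hi, List.drop_eq_getElem_cons hi, List.take_succ_cons,
    List.singleton_append]

theorem es_dcpo_eq (P : List Int) (R : List (Int × Int)) : es_dcpo P R = es_dcpo_alt P R := by
  by_cases h1 : ∀ a ∈ P, (a, a) ∈ R
  · by_cases h2 : ∀ p ∈ R, p.1 = p.2 ∨ (p.2, p.1) ∉ R
    · by_cases h3 : ∀ p ∈ R, ∀ q ∈ R, p.2 = q.1 → (p.1, q.2) ∈ R
      · have hord : es_orden_parcial P R = true := by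
          unfold es_orden_parcial
          rw [Bool.and_eq_true, Bool.and_eq_true, refl_iff, anti_iff, trans_iff]
          exact ⟨⟨h1, h2⟩, h3⟩
        have hc1 := (altRefl_iff P R).mpr h1
        have hc2 := (altAnti_iff P R).mpr h2
        have hc3 := (altTrans_iff P R).mpr h3
        have hBpt : ∀ i, i < P.length →
            (bSweep (buildUp R)
                (PySem.Set.inter ((buildUp R).getD (P.getD i 0) PySem.Set.empty) (PySem.Set.ofList P))
                [P.getD i 0] [] (P.drop (i + 1)) = true ↔
              ∀ t : Nat, 1 ≤ t → t ≤ (P.drop (i + 1)).length →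
                winOK P R ((P.drop i).take (t + 1)) = true) := by
          intro i hi
          have hx0 : P.getD i 0 ∈ P := by
            rw [List.getD_eq_getElem _ _ hi]; exact List.getElem_mem hi
          rw [bSweep_eq P R (P.drop (i + 1)) [P.getD i 0] _ _ _ (sweepInit P R h1 _ hx0),
            sweepSpec_iff]
          exact forall_congr' fun t => imp_congr_right fun _ => imp_congr_right fun _ => by
            rw [window_shift P i hi t]
        unfold es_dcpo es_dcpo_alt
        simp only [hord, hc1, hc2, hc3, Bool.not_true, Bool.false_eq_true, if_false]
        simp only [foldl_collect_all]
        rw [Bool.eq_iff_iff]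
        simp only [List.all_nil, Bool.true_and, List.all_eq_true, List.mem_range'_1,
          List.mem_range]
        constructor
        · intro hL i hi
          rw [hBpt i hi]
          intro t ht1 ht2
          rw [List.length_drop] at ht2
          exact (window_iff P R h1 i (t + 1) (by omega)).mp
            (hL (t + 1) ⟨by omega, by omega⟩ i hi)
        · intro hR s hs i hi
          obtain ⟨hs2, hsn⟩ := hs
          by_cases hle : i + s ≤ P.length
          · have := (hBpt i hi).mp (hR i hi) (s - 1) (by omega)
              (by rw [List.length_drop]; omega)
            have hw : s - 1 + 1 = s := by omega
            rw [hw] at this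
            exact (window_iff P R h1 i s hle).mpr this
          · simp
            exact Or.inl (Or.inl (by omega))
      · have hord : es_orden_parcial P R = false := by
          rw [Bool.eq_false_iff]
          intro hc
          unfold es_orden_parcial at hc
          rw [Bool.and_eq_true, Bool.and_eq_true, trans_iff] at hc
          exact h3 hc.2
        have hc1 := (altRefl_iff P R).mpr h1
        have hc2 := (altAnti_iff P R).mpr h2
        have hc3 : (R.all fun p => PySem.Set.issubset ((buildUp R).getD p.2 PySem.Set.empty) ((buildUp R).getD p.1 PySem.Set.empty)) = false := by
          rw [Bool.eq_false_iff]
          intro hc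
          exact h3 ((altTrans_iff P R).mp hc)
        simp only [es_dcpo, es_dcpo_alt, hord, hc1, hc2, hc3]
        simp
    · have hord : es_orden_parcial P R = false := by
        rw [Bool.eq_false_iff]
        intro hc
        unfold es_orden_parcial at hc
        rw [Bool.and_eq_true, Bool.and_eq_true, anti_iff] at hc
        exact h2 hc.1.2
      have hc1 := (altRefl_iff P R).mpr h1
      have hc2 : (R.all fun p => !(decide (p.1 ≠ p.2) && PySem.Set.contains ((buildUp R).getD p.2 PySem.Set.empty) p.1)) = false := by
        rw [Bool.eq_false_iff]
        intro hc
        exact h2 ((altAnti_iff P R).mp hc)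
      simp only [es_dcpo, es_dcpo_alt, hord, hc1, hc2]
      simp
  · have hord : es_orden_parcial P R = false := by
      rw [Bool.eq_false_iff]
      intro hc
      unfold es_orden_parcial at hc
      rw [Bool.and_eq_true, Bool.and_eq_true, refl_iff] at hc
      exact h1 hc.1.1
    have hc1 : (P.all fun a => PySem.Set.contains ((buildUp R).getD a PySem.Set.empty) a) = false := by
      rw [Bool.eq_false_iff]
      intro hc
      exact h1 ((altRefl_iff P R).mp hc)
    simp only [es_dcpo, es_dcpo_alt, hord, hc1]
    simp

-- ===== VERDICT (by name: the statement is the Claim_ definition above) =====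
theorem es_dcpo_spec : Claim_equal_es_dcpo := by
  intro P R _
  exact es_dcpo_eq P R
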